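-- pv_equiv track=rewrite | github.com/Dlybeck/AI | HW_2/connect4player.py | Score_Quartet
-- ===== SOURCE A (Python) =====
-- def Score_Quartet(quartet, id):
--     '''
--     Takes a given quarted and scores it
--     Returns the score
--     '''
--     whos_quartet = 0 #variable to keep track of what player has the first disc in this quarted
--     count = 0
--     for i in range(len(quartet)):
--         #what player's discs are in this quartet?
--         if(whos_quartet == 0 and quartet[i] != 0):
--             whos_quartet = quartet[i]
--
--         #There is nothing in this quartet
--         if(quartet[i] == 0): continue
--         #There is only one color in this quartet
--         elif(quartet[i] == whos_quartet):
--             count += 1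
--         #there is a mix of discs in this quartet
--         else:
--             count = 0
--             break
--     if(count != 0 and whos_quartet != 0):
--         if(whos_quartet == id):
--             #Positive
--             if(count == 1): return 1
--             elif(count == 2): return 10
--             elif(count == 3): return 100
--             else: return 1000000
--         else:
--             #negative
--             if(count == 1): return -1
--             elif(count == 2): return -10
--             elif(count == 3): return -100
--             else: return -1000000
--
--     else:
--         return 0
-- ===== SOURCE B (Python) =====
-- def Score_Quartet(quartet, id):
--     nonzero = [x for x in quartet if x != 0]
--     distinct = set(nonzero)
--     if len(distinct) != 1:
--         return 0
--     who = next(iter(distinct))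
--     magnitude = {1: 1, 2: 10, 3: 100}.get(len(nonzero), 1000000)
--     return magnitude if who == id else -magnitude
-- ===== Notes on version B (the rewrite author's own statement) =====
-- stated objective: simpler
-- what changed: replaces the stateful scan with early break by filtering to the nonzero discs, branching on the size of their distinct-value set, and a dict lookup for the magnitude
import Mathlib
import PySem

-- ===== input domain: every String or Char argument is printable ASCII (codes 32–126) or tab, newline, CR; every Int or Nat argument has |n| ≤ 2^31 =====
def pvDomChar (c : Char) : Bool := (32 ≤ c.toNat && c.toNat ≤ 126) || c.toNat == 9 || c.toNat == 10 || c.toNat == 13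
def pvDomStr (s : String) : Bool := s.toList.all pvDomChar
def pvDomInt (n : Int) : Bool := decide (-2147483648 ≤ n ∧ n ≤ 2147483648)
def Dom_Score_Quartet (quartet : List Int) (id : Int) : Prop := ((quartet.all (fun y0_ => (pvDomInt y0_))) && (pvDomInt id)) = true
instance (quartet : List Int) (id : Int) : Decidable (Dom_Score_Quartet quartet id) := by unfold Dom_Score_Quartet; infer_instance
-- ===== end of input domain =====

-- B replaces A's stateful scan with early break by filtering to the nonzero discs,
-- branching on the size of their distinct-value set and a dict lookup for the magnitude (objective: simpler).

-- ===== PORT A =====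
-- the for-loop over range(len(quartet)) with state (whos_quartet, count); 'break' = returning early with count 0
def scoreLoopA : List Int → Int → Int → Int × Int
  | [], whos, count => (whos, count)
  | x :: xs, whos, count =>
      let whos := if whos = 0 ∧ x ≠ 0 then x else whos
      if x = 0 then scoreLoopA xs whos count
      else if x = whos then scoreLoopA xs whos (count + 1)
      else (whos, 0)

def Score_Quartet (quartet : List Int) (id : Int) : Int :=
  let r := scoreLoopA quartet 0 0
  let whos := r.1
  let count := r.2
  if count ≠ 0 ∧ whos ≠ 0 then
    if whos = id then
      if count = 1 then 1 else if count = 2 then 10 else if count = 3 then 100 else 1000000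
    else
      if count = 1 then -1 else if count = 2 then -10 else if count = 3 then -100 else -1000000
  else 0

-- ===== PORT B =====
def Score_Quartet_alt (quartet : List Int) (id : Int) : Int :=
  let nonzero := quartet.filter (fun x => x ≠ 0)
  let distinct : PySem.Set Int := PySem.Set.ofList nonzero
  if distinct.length ≠ 1 then 0
  else
    -- next(iter(distinct)): distinct is a singleton here, so iteration order is irrelevant
    let who := distinct.headI
    let magnitude := PySem.Dict.getD (PySem.Dict.ofList [((1:Int), (1:Int)), (2, 10), (3, 100)]) (nonzero.length : Int) 1000000
    if who = id then magnitude else -magnitude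

-- ===== PRECONDITION & SPEC =====
def Spec_Score_Quartet (quartet : List Int) (id : Int) (out : Int) : Prop := out = Score_Quartet_alt quartet id
instance (quartet : List Int) (id : Int) (out : Int) : Decidable (Spec_Score_Quartet quartet id out) := by unfold Spec_Score_Quartet; infer_instance

-- ===== CLAIM (what is proved, stated in full; the proofs are below) =====
def Claim_equal_Score_Quartet : Prop := ∀ (quartet : List Int) (id : Int), Dom_Score_Quartet quartet id → Spec_Score_Quartet quartet id (Score_Quartet quartet id)

-- ===== LEMMAS AND PROOFS =====

-- once whos = w ≠ 0 is fixed, the loop counts the nonzero entries if they all equal w, else breaks with count 0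
theorem scoreLoopA_char (xs : List Int) (w : Int) (hw : w ≠ 0) : ∀ c : Int,
    scoreLoopA xs w c =
      if (xs.filter (fun x => x ≠ 0)).all (fun x => x == w)
      then (w, c + ((xs.filter (fun x => x ≠ 0)).length : Int))
      else (w, 0) := by
  induction xs with
  | nil => intro c; simp [scoreLoopA]
  | cons x xs ih =>
    intro c
    by_cases hx : x = 0
    · simp [scoreLoopA, hx, hw, ih c]
    · rw [List.filter_cons_of_pos (by simp [hx])]
      by_cases hxw : x = w
      · subst hxw
        rw [show scoreLoopA (x :: xs) x c = scoreLoopA xs x (c + 1) from by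
          simp [scoreLoopA, hx], ih (c + 1), List.all_cons]
        simp only [beq_self_eq_true, Bool.true_and, List.length_cons]
        split_ifs with h
        · exact Prod.ext rfl (by push_cast; ring)
        · rfl
      · rw [show scoreLoopA (x :: xs) w c = (w, 0) from by simp [scoreLoopA, hx, hw, hxw]]
        have hb : (x == w) = false := by simpa using hxw
        simp [List.all_cons, hb]

theorem scoreLoopA_zero (xs : List Int) :
    scoreLoopA xs 0 0 =
      match xs.filter (fun x => x ≠ 0) with
      | [] => (0, 0)
      | v :: rest => if rest.all (fun x => x == v) then (v, 1 + (rest.length : Int)) else (v, 0) := by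
  induction xs with
  | nil => simp [scoreLoopA]
  | cons x xs ih =>
    by_cases hx : x = 0
    · simpa [scoreLoopA, hx] using ih
    · rw [show scoreLoopA (x :: xs) 0 0 = scoreLoopA xs x (0 + 1) from by
        simp [scoreLoopA, hx], List.filter_cons_of_pos (by simp [hx]),
        scoreLoopA_char xs x hx (0 + 1)]
      norm_num

-- if every element of rest equals v, the distinct set of v :: rest is the singleton [v]
theorem ofList_all_eq (v : Int) (rest : List Int) (h : ∀ y ∈ rest, y = v) :
    PySem.Set.ofList (v :: rest) = [v] := by
  induction rest with
  | nil => rfl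
  | cons y ys ih =>
    have hy : y = v := h y (by simp)
    subst hy
    rw [PySem.Set.ofList_cons] at *
    have := ih (fun z hz => h z (by simp [hz]))
    simp [PySem.Set.discard] at this ⊢
    simpa using this

-- the literal magnitude dict {1:1, 2:10, 3:100}.get(k, 1000000) as a chain of ifs
theorem magDict_getD (k : Int) :
    (PySem.Dict.ofList [((1:Int), (1:Int)), (2, 10), (3, 100)]).getD k 1000000 =
      if k = 1 then 1 else if k = 2 then 10 else if k = 3 then 100 else 1000000 := by
  have hitems : (PySem.Dict.ofList [((1:Int), (1:Int)), (2, 10), (3, 100)]).items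
      = [(1, 1), (2, 10), (3, 100)] := by decide
  simp only [PySem.Dict.getD, PySem.Dict.get?, hitems, List.find?]
  split_ifs with h1 h2 h3
  · subst h1; decide
  · subst h2; decide
  · subst h3; decide
  · simp only [beq_eq_false_iff_ne.mpr (fun h => h1 h.symm),
      beq_eq_false_iff_ne.mpr (fun h => h2 h.symm),
      beq_eq_false_iff_ne.mpr (fun h => h3 h.symm)]
    rfl

theorem Score_Quartet_eq (quartet : List Int) (id : Int) :
    Score_Quartet quartet id = Score_Quartet_alt quartet id := by
  unfold Score_Quartet Score_Quartet_alt
  rw [scoreLoopA_zero]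
  cases hnz : quartet.filter (fun x => x ≠ 0) with
  | nil => simp [hnz]
  | cons v rest =>
    have hv : v ≠ 0 := by
      have : v ∈ quartet.filter (fun x => x ≠ 0) := by rw [hnz]; simp
      simpa using (List.of_mem_filter this)
    by_cases hall : ∀ y ∈ rest, y = v
    · have hall' : rest.all (fun x => x == v) = true := by
        simp only [List.all_eq_true, beq_iff_eq]; exact hall
      have hset : PySem.Set.ofList (v :: rest) = [v] := ofList_all_eq v rest hall
      have hcne : (1 : Int) + (rest.length : Int) ≠ 0 := by positivity
      simp only [hall', if_true, hset, List.length_cons, List.length_nil, List.headI,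
        ne_eq, hcne, not_false_eq_true, hv, and_self, if_pos]
      simp only [not_true_eq_false, if_false]
      have hlen : ((rest.length + 1 : Nat) : Int) = 1 + (rest.length : Int) := by push_cast; ring
      rw [hlen]
      simp only [magDict_getD]
      by_cases hid : v = id <;> simp [hid] <;> split_ifs <;> norm_num
    · push_neg at hall
      obtain ⟨y, hy, hyv⟩ := hall
      have hall' : rest.all (fun x => x == v) = false := by
        simp only [List.all_eq_false]; exact ⟨y, hy, by simpa using hyv⟩
      have hset : (PySem.Set.ofList (v :: rest)).length ≠ 1 := by
        intro hlen1
        obtain ⟨w, hw⟩ := List.length_eq_one_iff.mp hlen1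
        have h1 : v = w := by
          have : v ∈ PySem.Set.ofList (v :: rest) := (PySem.Set.mem_ofList _ _).mpr (by simp)
          rw [hw] at this; simpa using this
        have h2 : y = w := by
          have : y ∈ PySem.Set.ofList (v :: rest) := (PySem.Set.mem_ofList _ _).mpr (by simp [hy])
          rw [hw] at this; simpa using this
        exact hyv (h2.trans h1.symm)
      simp [hall', hset]

-- ===== VERDICT (by name: the statement is the Claim_ definition above) =====
theorem Score_Quartet_spec : Claim_equal_Score_Quartet := by
  intro quartet id _
  exact Score_Quartet_eq quartet id
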